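-- pv_equiv track=rewrite | github.com/ooeunz/programmers | binaray_serarch/budget.py | solution
-- ===== SOURCE A (Python) =====
-- def cal_budgets(budgets: list, limit: int):
--     ans = 0
--     for budget in budgets:
--         if budget < limit:
--             ans += budget
--         else:
--             ans += limit
--     return ans
--
-- def solution(budgets, M):
--     low, high = 0, max(budgets)
--     ans = 0
--
--     while low <= high:
--         mid = (high + low) // 2
--         result = cal_budgets(budgets, mid)
--
--         if result > M:
--             high = mid - 1
--         elif result <= M:
--             ans = mid
--             low = mid + 1
--
--     return ans
-- ===== SOURCE B (Python) =====
-- def solution(budgets, M):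
--     # sort + prefix sums: the capped sum f(t) = min_i (pre[i] + (n-i)*t), so the
--     # largest feasible cap is max_i (M - pre[i]) // (n-i), clamped into [0, max(budgets)].
--     s = sorted(budgets)
--     n = len(s)
--     H = max(budgets)
--     if H < 0:
--         return 0
--     if sum(s) <= M:
--         return H
--     best = None
--     pre = 0
--     for i, x in enumerate(s):
--         t = (M - pre) // (n - i)
--         if best is None or t > best:
--             best = t
--         pre += x
--     return max(0, min(H, best))
-- ===== Notes on version B (the rewrite author's own statement) =====
-- stated objective: faster
-- what changed: Replaced the O(n log V) binary search over cap values (each step re-summing the whole list) by a single sort with a running prefix sum: since the capped sum is the minimum of the linear functions pre[i]+(n-i)*t, the answer is the maximum of the floor divisions (M-pre[i])//(n-i) clamped into [0, max(budgets)].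
import Mathlib
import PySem

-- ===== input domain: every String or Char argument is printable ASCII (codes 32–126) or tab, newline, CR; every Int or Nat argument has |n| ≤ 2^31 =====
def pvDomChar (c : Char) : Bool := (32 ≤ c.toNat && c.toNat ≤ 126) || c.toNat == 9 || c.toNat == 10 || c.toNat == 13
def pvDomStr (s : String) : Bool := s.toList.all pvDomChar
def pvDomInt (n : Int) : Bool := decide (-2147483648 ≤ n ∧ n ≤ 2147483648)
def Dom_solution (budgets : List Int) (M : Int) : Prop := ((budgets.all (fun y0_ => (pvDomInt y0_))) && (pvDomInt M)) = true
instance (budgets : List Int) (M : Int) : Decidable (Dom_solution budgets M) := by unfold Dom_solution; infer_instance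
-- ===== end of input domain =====

-- B replaces A's binary search over cap values by sort + prefix sums + one floor division
-- per element (objective: faster, O(n log n) instead of O(n log V)).


-- ===== PORT A =====
def cal_budgets (budgets : List Int) (limit : Int) : Int :=
  budgets.foldl (fun ans budget => if budget < limit then ans + budget else ans + limit) 0

def solutionLoop (budgets : List Int) (M low high ans : Int) : Int :=
  if h : low ≤ high then
    let mid := PySem.Int.floordiv (high + low) 2
    let result := cal_budgets budgets mid
    if result > M then solutionLoop budgets M low (mid - 1) ans
    else solutionLoop budgets M (mid + 1) high mid
  else ans
termination_by (high + 1 - low).toNat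
decreasing_by
  all_goals
    have hb := PySem.Int.floordiv_two_mid_bounds h
    rw [Int.add_comm low high] at hb
    omega

def solution (budgets : List Int) (M : Int) : Int :=
  solutionLoop budgets M 0 ((PySem.List.max? budgets (fun x => x)).getD 0) 0

-- ===== PORT B =====
-- the loop body of Source B's 'for i, x in enumerate(s)' (state: (best, pre))
def altStep (M n : Int) (acc : Option Int × Int) (ix : Int × Int) : Option Int × Int :=
  let t := PySem.Int.floordiv (M - acc.2) (n - ix.1)
  (match acc.1 with
   | none => some t
   | some b => if t > b then some t else some b, acc.2 + ix.2)

def solution_alt (budgets : List Int) (M : Int) : Int :=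
  let s := PySem.List.sorted budgets (fun x => x) false
  let n : Int := s.length
  let H := (PySem.List.max? budgets (fun x => x)).getD 0
  if H < 0 then 0
  else if s.sum ≤ M then H
  else
    let bp := (PySem.List.enumerate s 0).foldl (altStep M n) (none, 0)
    match bp.1 with
    | none => 0
    | some best => max 0 (min H best)

-- ===== PRECONDITION & SPEC =====
-- Pre_ excludes only the empty list, on which Python's max(budgets) raises ValueError.
def Pre_solution (budgets : List Int) (M : Int) : Prop := budgets ≠ []
instance (budgets : List Int) (M : Int) : Decidable (Pre_solution budgets M) := by unfold Pre_solution; infer_instance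
def pvWitness_solution : List Int × Int := ([1, 3, 2], 4)
def Spec_solution (budgets : List Int) (M : Int) (out : Int) : Prop := out = solution_alt budgets M
instance (budgets : List Int) (M : Int) (out : Int) : Decidable (Spec_solution budgets M out) := by unfold Spec_solution; infer_instance

-- ===== CLAIM (what is proved, stated in full; the proofs are below) =====
def Claim_equal_solution : Prop := ∀ (budgets : List Int) (M : Int), Dom_solution budgets M → Pre_solution budgets M → Spec_solution budgets M (solution budgets M)

-- ===== LEMMAS AND PROOFS =====

-- capped sum: f(t) = sum of min(b, t)
def fsum (l : List Int) (t : Int) : Int := (l.map (fun b => min b t)).sum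

-- characterization shared by both ports: r is the largest feasible cap in [0, H], or 0
def Good (budgets : List Int) (M H r : Int) : Prop :=
  0 ≤ r ∧ (r = 0 ∨ (r ≤ H ∧ fsum budgets r ≤ M)) ∧
  (∀ t, 0 ≤ t → t ≤ H → fsum budgets t ≤ M → t ≤ r)

lemma good_unique {budgets : List Int} {M H r r' : Int}
    (h : Good budgets M H r) (h' : Good budgets M H r') : r = r' := by
  obtain ⟨h0, h1, h2⟩ := h
  obtain ⟨h0', h1', h2'⟩ := h'
  rcases h1 with rfl | ⟨hle, hf⟩
  · rcases h1' with rfl | ⟨hle', hf'⟩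
    · rfl
    · exact le_antisymm h0' (h2 _ h0' hle' hf')
  · rcases h1' with rfl | ⟨hle', hf'⟩
    · exact le_antisymm (h2' _ h0 hle hf) h0
    · exact le_antisymm (h2' _ h0 hle hf) (h2 _ h0' hle' hf')

lemma cal_eq_fsum (l : List Int) (t : Int) : cal_budgets l t = fsum l t := by
  have key : ∀ (l : List Int) (a : Int),
      l.foldl (fun ans budget => if budget < t then ans + budget else ans + t) a
        = a + fsum l t := by
    intro l
    induction l with
    | nil => intro a; simp [fsum]
    | cons x r ih =>
      intro a
      simp only [List.foldl_cons, fsum, List.map_cons, List.sum_cons] at *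
      rw [ih]
      by_cases hx : x < t
      · simp [hx, min_eq_left (le_of_lt hx)]; ring
      · simp [hx, min_eq_right (le_of_not_gt hx)]; ring
  simpa using key l 0


lemma fsum_mono (l : List Int) {t u : Int} (h : t ≤ u) : fsum l t ≤ fsum l u := by
  induction l with
  | nil => simp [fsum]
  | cons x r ih =>
    simp only [fsum, List.map_cons, List.sum_cons] at *
    exact add_le_add (min_le_min (le_refl x) h) ih


lemma fsum_perm {l l' : List Int} (h : l.Perm l') (t : Int) : fsum l t = fsum l' t := by
  exact List.Perm.sum_eq ((h.map _))


lemma fsum_eq_sum_of_ub {l : List Int} {H : Int} (h : ∀ b ∈ l, b ≤ H) : fsum l H = l.sum := by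
  induction l with
  | nil => simp [fsum]
  | cons x r ih =>
    simp only [fsum, List.map_cons, List.sum_cons] at *
    rw [min_eq_left (h x (by simp)), ih (fun b hb => h b (by simp [hb]))]


-- A-side: loop invariant
lemma loop_good (budgets : List Int) (M H : Int) :
    ∀ (n : Nat) (low high ans : Int), (high + 1 - low).toNat ≤ n →
    0 ≤ low → high ≤ H →
    (ans = 0 ∨ (0 ≤ ans ∧ ans ≤ H ∧ ans < low ∧ fsum budgets ans ≤ M)) →
    (∀ t, high < t → t ≤ H → M < fsum budgets t) →
    (∀ t, 0 ≤ t → t < low → fsum budgets t ≤ M → t ≤ ans) →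
    Good budgets M H (solutionLoop budgets M low high ans) := by
  intro n
  induction n with
  | zero =>
    intro low high ans hn h0 h4 h1 h2 h3
    have hlh : ¬ low ≤ high := by omega
    rw [solutionLoop, dif_neg hlh]
    refine ⟨?_, ?_, ?_⟩
    · rcases h1 with rfl | ⟨ha, _, _, _⟩ <;> omega
    · rcases h1 with rfl | ⟨_, ha, _, hf⟩
      · exact Or.inl rfl
      · exact Or.inr ⟨ha, hf⟩
    · intro t ht htH hPt
      by_cases hth : t ≤ high
      · exact h3 t ht (by omega) hPt
      · exact absurd hPt (not_le.mpr (h2 t (by omega) htH))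
  | succ m ih =>
    intro low high ans hn h0 h4 h1 h2 h3
    by_cases hlh : low ≤ high
    · rw [solutionLoop, dif_pos hlh]
      have hb := PySem.Int.floordiv_two_mid_bounds hlh
      rw [Int.add_comm low high] at hb
      show Good budgets M H
        (if cal_budgets budgets (PySem.Int.floordiv (high + low) 2) > M then
          solutionLoop budgets M low (PySem.Int.floordiv (high + low) 2 - 1) ans
        else
          solutionLoop budgets M (PySem.Int.floordiv (high + low) 2 + 1) high
            (PySem.Int.floordiv (high + low) 2))
      set mid := PySem.Int.floordiv (high + low) 2 with hmid
      by_cases hres : cal_budgets budgets mid > M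
      · rw [if_pos hres]
        rw [cal_eq_fsum] at hres
        apply ih low (mid - 1) ans (by omega) h0 (by omega) h1 _ h3
        intro t hmt htH
        by_cases hth : high < t
        · exact h2 t hth htH
        · exact lt_of_lt_of_le hres (fsum_mono budgets (by omega))
      · rw [if_neg hres]
        rw [cal_eq_fsum, not_lt] at hres
        apply ih (mid + 1) high mid (by omega) (by omega) h4
        · exact Or.inr ⟨by omega, by omega, by omega, hres⟩
        · exact h2
        · intro t ht htl hPt
          by_cases htl2 : t < low
          · exact le_trans (h3 t ht htl2 hPt) (by omega)
          · omega
    · have hn' : (high + 1 - low).toNat ≤ 0 := by omega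
      exact (by
        rw [solutionLoop, dif_neg hlh]
        refine ⟨?_, ?_, ?_⟩
        · rcases h1 with rfl | ⟨ha, _, _, _⟩ <;> omega
        · rcases h1 with rfl | ⟨_, ha, _, hf⟩
          · exact Or.inl rfl
          · exact Or.inr ⟨ha, hf⟩
        · intro t ht htH hPt
          by_cases hth : t ≤ high
          · exact h3 t ht (by omega) hPt
          · exact absurd hPt (not_le.mpr (h2 t (by omega) htH)))

lemma A_good (budgets : List Int) (M H : Int)
    (hmax : PySem.List.max? budgets (fun x => x) = some H) :
    Good budgets M H (solution budgets M) := by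
  unfold solution
  rw [hmax, Option.getD_some]
  apply loop_good budgets M H (H + 1 - 0).toNat 0 H 0 le_rfl le_rfl le_rfl (Or.inl rfl)
  · intro t h1 h2
    exact absurd h2 (not_le.mpr h1)
  · intro t ht hlt _
    omega

-- B-side helpers
def omax (o : Option Int) (t : Int) : Option Int :=
  match o with
  | none => some t
  | some b => if t > b then some t else some b

def cands (n M : Int) : List Int → Int → Int → List Int
  | [], _, _ => []
  | x :: r, k, p => PySem.Int.floordiv (M - p) (n - k) :: cands n M r (k + 1) (p + x)

lemma fold_eq_cands (M n : Int) : ∀ (s' : List Int) (k p : Int) (b : Option Int),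
    (PySem.List.enumerate s' k).foldl (altStep M n) (b, p)
      = ((cands n M s' k p).foldl omax b, p + s'.sum) := by
  intro s'
  induction s' with
  | nil => intro k p b; simp [PySem.List.enumerate_nil, cands]
  | cons x r ih =>
    intro k p b
    rw [PySem.List.enumerate_cons]
    simp only [List.foldl_cons, cands, List.sum_cons]
    rw [show altStep M n (b, p) (k, x) = (omax b (PySem.Int.floordiv (M - p) (n - k)), p + x)
        from rfl]
    rw [ih (k + 1) (p + x) _, add_assoc]


lemma foldl_omax_some (l : List Int) : ∀ b : Int,
    ∃ x, l.foldl omax (some b) = some x ∧ b ≤ x ∧ (∀ c ∈ l, c ≤ x) ∧ (x = b ∨ x ∈ l) := by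
  induction l with
  | nil => intro b; exact ⟨b, rfl, le_refl b, by simp, Or.inl rfl⟩
  | cons c r ih =>
    intro b
    simp only [List.foldl_cons]
    by_cases hc : c > b
    · obtain ⟨x, hx, hbx, hall, hmem⟩ := ih c
      refine ⟨x, by simpa [omax, hc] using hx, le_of_lt (lt_of_lt_of_le hc hbx), ?_, ?_⟩
      · intro d hd
        rcases List.mem_cons.mp hd with rfl | hd
        · exact hbx
        · exact hall d hd
      · rcases hmem with rfl | hmem
        · exact Or.inr (by simp)
        · exact Or.inr (by simp [hmem])
    · obtain ⟨x, hx, hbx, hall, hmem⟩ := ih b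
      refine ⟨x, by simpa [omax, hc] using hx, hbx, ?_, ?_⟩
      · intro d hd
        rcases List.mem_cons.mp hd with rfl | hd
        · exact le_trans (le_of_not_gt hc) hbx
        · exact hall d hd
      · rcases hmem with rfl | hmem
        · exact Or.inl rfl
        · exact Or.inr (by simp [hmem])


lemma foldl_omax_none {l : List Int} (hl : l ≠ []) :
    ∃ x, l.foldl omax none = some x ∧ (∀ c ∈ l, c ≤ x) ∧ x ∈ l := by
  cases l with
  | nil => exact absurd rfl hl
  | cons c r =>
    simp only [List.foldl_cons]
    obtain ⟨x, hx, hbx, hall, hmem⟩ := foldl_omax_some r c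
    refine ⟨x, by simpa [omax] using hx, ?_, ?_⟩
    · intro d hd
      rcases List.mem_cons.mp hd with rfl | hd
      · exact hbx
      · exact hall d hd
    · rcases hmem with rfl | hmem
      · simp
      · simp [hmem]


lemma mem_cands_iff (n M : Int) : ∀ (s' : List Int) (k p c : Int),
    c ∈ cands n M s' k p ↔
      ∃ j : Nat, j < s'.length ∧
        c = PySem.Int.floordiv (M - (p + (s'.take j).sum)) (n - (k + (j : Int))) := by
  intro s'
  induction s' with
  | nil => intro k p c; simp [cands]
  | cons x r ih =>
    intro k p c
    simp only [cands, List.mem_cons, List.length_cons]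
    constructor
    · rintro (rfl | hc)
      · exact ⟨0, by omega, by simp⟩
      · obtain ⟨j, hj, hcj⟩ := (ih (k + 1) (p + x) c).mp hc
        refine ⟨j + 1, by omega, ?_⟩
        rw [hcj]
        simp only [List.take_succ_cons, List.sum_cons]
        congr 1
        · ring
        · push_cast; ring
    · rintro ⟨j, hj, hcj⟩
      cases j with
      | zero => exact Or.inl (by simpa using hcj)
      | succ j' =>
        refine Or.inr ((ih (k + 1) (p + x) c).mpr ⟨j', by omega, ?_⟩)
        rw [hcj]
        simp only [List.take_succ_cons, List.sum_cons]
        congr 1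
        · ring
        · push_cast; ring


lemma fsum_filter (l : List Int) (t : Int) :
    fsum l t = (l.filter (fun b => b < t)).sum
      + ((l.length : Int) - (l.filter (fun b => b < t)).length) * t := by
  induction l with
  | nil => simp [fsum]
  | cons x r ih =>
    simp only [fsum, List.map_cons, List.sum_cons, List.filter_cons] at *
    by_cases hx : x < t
    · simp only [hx, decide_true, if_pos, List.sum_cons, List.length_cons, List.length_cons]
      rw [min_eq_left (le_of_lt hx)]
      rw [ih]
      push_cast [List.length_cons]
      ring
    · simp only [hx, decide_false, if_neg, Bool.false_eq_true, not_false_iff]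
      rw [min_eq_right (le_of_not_gt hx)]
      rw [ih]
      push_cast [List.length_cons]
      ring


lemma sorted_filter_eq_take {l : List Int} (hs : l.Pairwise (· ≤ ·)) (t : Int) :
    l.filter (fun b => b < t) = l.take ((l.filter (fun b => b < t)).length) := by
  induction l with
  | nil => simp
  | cons x r ih =>
    rcases List.pairwise_cons.mp hs with ⟨hx, hr⟩
    by_cases hxt : x < t
    · simp only [List.filter_cons, hxt, decide_true, if_pos, List.length_cons, List.take_succ_cons]
      rw [← ih hr]
    · have hfr : r.filter (fun b => b < t) = [] := by
        rw [List.filter_eq_nil_iff]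
        intro b hb
        simp only [decide_eq_true_eq]
        exact fun hbt => hxt (lt_of_le_of_lt (hx b hb) hbt)
      simp [hxt, hfr]


lemma fsum_le_seg (t : Int) : ∀ (l : List Int) (j : Nat), j ≤ l.length →
    fsum l t ≤ (l.take j).sum + ((l.length : Int) - j) * t := by
  intro l j hj
  conv_lhs => rw [← List.take_append_drop j l]
  have hadd : ∀ (u v : List Int), fsum (u ++ v) t = fsum u t + fsum v t := by
    intro u v; simp [fsum]
  rw [hadd]
  have h1 : fsum (l.take j) t ≤ (l.take j).sum := by
    have : ∀ (u : List Int), fsum u t ≤ u.sum := by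
      intro u
      induction u with
      | nil => simp [fsum]
      | cons y w ihw =>
        simp only [fsum, List.map_cons, List.sum_cons] at *
        exact add_le_add (min_le_left y t) ihw
    exact this _
  have h2 : fsum (l.drop j) t ≤ ((l.drop j).length : Int) * t := by
    have : ∀ (u : List Int), fsum u t ≤ (u.length : Int) * t := by
      intro u
      induction u with
      | nil => simp [fsum]
      | cons y w ihw =>
        simp only [fsum, List.map_cons, List.sum_cons, List.length_cons] at *
        push_cast
        ring_nf
        ring_nf at ihw
        linarith [ihw, min_le_right y t]
    exact this _
  have hlen : ((l.drop j).length : Int) = (l.length : Int) - j := by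
    rw [List.length_drop]; omega
  rw [hlen] at h2
  linarith


lemma B_good (budgets : List Int) (M H : Int) (hne : budgets ≠ [])
    (hmax : PySem.List.max? budgets (fun x => x) = some H) :
    Good budgets M H (solution_alt budgets M) := by
  have hub : ∀ b ∈ budgets, b ≤ H := fun b hb => PySem.List.max?_isMax hmax b hb
  unfold solution_alt
  rw [hmax, Option.getD_some]
  have hperm : (PySem.List.sorted budgets (fun x => x) false).Perm budgets :=
    PySem.List.sorted_perm budgets (fun x => x) false
  set s := PySem.List.sorted budgets (fun x => x) false with hs
  have hfs : ∀ t, fsum s t = fsum budgets t := fun t => fsum_perm hperm t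
  have hsum : s.sum = budgets.sum := hperm.sum_eq
  have hpair : s.Pairwise (· ≤ ·) := PySem.List.sorted_pairwise budgets (fun x => x)
  by_cases hH : H < 0
  · rw [if_pos hH]
    exact ⟨le_refl 0, Or.inl rfl, fun t ht htH _ => by omega⟩
  · rw [if_neg hH]
    by_cases htot : s.sum ≤ M
    · rw [if_pos htot]
      refine ⟨by omega, Or.inr ⟨le_refl H, ?_⟩, fun t _ htH _ => htH⟩
      rw [← hfs, fsum_eq_sum_of_ub (fun b hb => hub b (hperm.mem_iff.mp hb))]
      exact htot
    · rw [if_neg htot]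
      have hsne : s ≠ [] := by
        intro h
        exact hne (List.length_eq_zero_iff.mp (by simpa [h] using hperm.length_eq.symm))
      show Good budgets M H
        (match ((PySem.List.enumerate s 0).foldl (altStep M (s.length : Int)) (none, 0)).1 with
          | none => 0
          | some best => max 0 (min H best))
      rw [fold_eq_cands M (s.length : Int) s 0 0 none]
      have hcne : cands (s.length : Int) M s 0 0 ≠ [] := by
        obtain ⟨x, r, hxr⟩ := List.exists_cons_of_ne_nil hsne
        rw [hxr]
        simp [cands]
      obtain ⟨T, hT, hTub, hTmem⟩ := foldl_omax_none hcne
      simp only [hT]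
      set r := max 0 (min H T) with hr
      have hr0 : 0 ≤ r := le_max_left 0 _
      have hminr : min H T ≤ r := le_max_right _ _
      refine ⟨hr0, ?_, ?_⟩
      · by_cases hz : r = 0
        · exact Or.inl hz
        · have hpos : 0 < min H T := by
            by_cases h : min H T ≤ 0
            · exact absurd (by rw [hr, max_eq_left h]) hz
            · exact not_le.mp h
          have hrmin : r = min H T := by rw [hr, max_eq_right (le_of_lt hpos)]
          refine Or.inr ⟨by rw [hrmin]; exact min_le_left _ _, ?_⟩
          obtain ⟨j, hj, hTj⟩ := (mem_cands_iff (s.length : Int) M s 0 0 T).mp hTmem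
          have hjlt : (j : Int) < (s.length : Int) := by exact_mod_cast hj
          have hd0 : (0 : Int) < (s.length : Int) - (0 + (j : Int)) := by omega
          have hTd : T * ((s.length : Int) - (0 + (j : Int))) ≤ M - (0 + (s.take j).sum) :=
            (PySem.Int.le_floordiv_iff_mul_le hd0).mp (le_of_eq hTj)
          have hfle := fsum_le_seg r s j (le_of_lt hj)
          have hrT : r ≤ T := by rw [hrmin]; exact min_le_right _ _
          have hmul : ((s.length : Int) - (j : Int)) * r ≤ ((s.length : Int) - (j : Int)) * T :=
            mul_le_mul_of_nonneg_left hrT (by omega)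
          rw [← hfs]
          nlinarith [hfle, hmul, hTd]
      · intro t ht htH hPt
        have hPst : fsum s t ≤ M := by rw [hfs]; exact hPt
        set k := (s.filter (fun b => b < t)).length with hk
        have hkle : k ≤ s.length := List.length_filter_le _ _
        have hfeq : fsum s t = (s.take k).sum + ((s.length : Int) - k) * t := by
          rw [fsum_filter s t, sorted_filter_eq_take hpair t, ← hk]
          have hlen : ((s.take k).length : Int) = (k : Int) := by
            rw [List.length_take]
            omega
          rw [hlen]
        by_cases hkn : k = s.length
        · exfalso
          rw [hfeq, hkn, List.take_length] at hPst
          simp only [sub_self, zero_mul, add_zero] at hPst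
          exact htot hPst
        · have hklt : k < s.length := lt_of_le_of_ne hkle hkn
          have hd0 : (0 : Int) < (s.length : Int) - (0 + (k : Int)) := by
            have : (k : Int) < (s.length : Int) := by exact_mod_cast hklt
            omega
          have hcand :
              PySem.Int.floordiv (M - (0 + (s.take k).sum)) ((s.length : Int) - (0 + (k : Int)))
                ∈ cands (s.length : Int) M s 0 0 :=
            (mem_cands_iff (s.length : Int) M s 0 0 _).mpr ⟨k, hklt, rfl⟩
          have htk : t ≤ PySem.Int.floordiv (M - (0 + (s.take k).sum))
              ((s.length : Int) - (0 + (k : Int))) := by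
            apply (PySem.Int.le_floordiv_iff_mul_le hd0).mpr
            nlinarith [hfeq, hPst]
          have htT : t ≤ T := le_trans htk (hTub _ hcand)
          exact le_trans (le_min htH htT) hminr

-- ===== VERDICT (by name: the statement is the Claim_ definition above) =====
theorem solution_spec : Claim_equal_solution := by
  intro budgets M _ hpre
  unfold Spec_solution
  obtain ⟨H, hmax⟩ : ∃ H, PySem.List.max? budgets (fun x => x) = some H := by
    cases h : PySem.List.max? budgets (fun x => x) with
    | none => exact absurd ((PySem.List.max?_eq_none_iff budgets (fun x => x)).mp h) hpre
    | some H => exact ⟨H, rfl⟩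
  exact good_unique (A_good budgets M H hmax) (B_good budgets M H hpre hmax)
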